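-- pv_equiv track=rewrite | github.com/WojciechLopata/Pracownia_Programowania_1 | 9.temat_inheritance/message.py | set_message
-- ===== SOURCE A (Python) =====
-- def set_message(message):
--     is_first=True
--     message_1=""
--     for letter in message:
--         if(is_first):
--             message_1+=letter.upper()
--             is_first=False
--         else:message_1+=letter.lower()
--     message_1+=" BYE"
--     return message_1
-- ===== SOURCE B (Python) =====
-- def set_message(message):
--     return message[:1].upper() + message[1:].lower() + " BYE"
-- ===== Notes on version B (the rewrite author's own statement) =====
-- stated objective: simpler
-- what changed: Replaces the character loop with an is_first flag and string accumulator by a single expression built from slicing and bulk str.upper/str.lower calls; the bulk C-level string methods avoid per-character Python bytecode and quadratic string appends.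
import Mathlib
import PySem

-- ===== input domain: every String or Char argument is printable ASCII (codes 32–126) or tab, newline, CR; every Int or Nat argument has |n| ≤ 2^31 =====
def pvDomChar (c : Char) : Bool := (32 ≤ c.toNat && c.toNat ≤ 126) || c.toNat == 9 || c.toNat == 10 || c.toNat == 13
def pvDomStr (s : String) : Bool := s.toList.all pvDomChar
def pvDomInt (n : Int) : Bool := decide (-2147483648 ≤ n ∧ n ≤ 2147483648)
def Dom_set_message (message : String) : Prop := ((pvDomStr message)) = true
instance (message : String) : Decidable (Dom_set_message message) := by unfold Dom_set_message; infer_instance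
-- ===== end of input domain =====

-- B replaces A's character loop with an is_first flag by slicing plus bulk upper/lower; objective: simpler.

-- ===== PORT A =====
-- loop over the characters, state = (is_first, message_1); " BYE" appended at the end
def set_message (message : String) : String :=
  String.mk ((message.toList.foldl
    (fun (st : Bool × List Char) letter =>
      if st.1 then (false, st.2 ++ PySem.Chars.upper [letter])
      else (st.1, st.2 ++ PySem.Chars.lower [letter]))
    (true, [])).2 ++ " BYE".toList)

-- ===== PORT B =====
-- message[:1].upper() + message[1:].lower() + " BYE"
def set_message_alt (message : String) : String :=
  String.mk (PySem.Chars.upper (PySem.List.slice message.toList none (some 1)) ++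
             PySem.Chars.lower (PySem.List.slice message.toList (some 1) none) ++
             " BYE".toList)

-- ===== PRECONDITION & SPEC =====
def Spec_set_message (message : String) (out : String) : Prop := out = set_message_alt message
instance (message : String) (out : String) : Decidable (Spec_set_message message out) := by unfold Spec_set_message; infer_instance

-- ===== CLAIM (what is proved, stated in full; the proofs are below) =====
def Claim_equal_set_message : Prop := ∀ (message : String), Dom_set_message message → Spec_set_message message (set_message message)

-- ===== LEMMAS AND PROOFS =====
-- once is_first is false, A's loop just appends the lowercased characters
theorem set_message_loop_false (cs : List Char) (acc : List Char) :
    cs.foldl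
      (fun (st : Bool × List Char) letter =>
        if st.1 then (false, st.2 ++ PySem.Chars.upper [letter])
        else (st.1, st.2 ++ PySem.Chars.lower [letter]))
      (false, acc)
    = (false, acc ++ PySem.Chars.lower cs) := by
  induction cs generalizing acc with
  | nil => simp [PySem.Chars.lower]
  | cons c cs ih =>
      rw [List.foldl_cons]
      have hstep : (if (false, acc).1 = true
          then (false, acc ++ PySem.Chars.upper [c])
          else ((false, acc).1, acc ++ PySem.Chars.lower [c]))
          = ((false : Bool), acc ++ PySem.Chars.lower [c]) := by simp
      rw [hstep, ih]
      simp [PySem.Chars.lower]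

-- ===== VERDICT (by name: the statement is the Claim_ definition above) =====
theorem set_message_spec : Claim_equal_set_message := by
  intro message _
  unfold Spec_set_message set_message set_message_alt
  rw [PySem.List.slice_to message.toList (by norm_num : (0:Int) ≤ 1), PySem.List.slice_from message.toList (by norm_num : (0:Int) ≤ 1)]
  cases h : message.toList with
  | nil => simp [PySem.Chars.upper, PySem.Chars.lower]
  | cons c cs =>
      rw [List.foldl_cons]
      have hstep : (if ((true : Bool), ([] : List Char)).1 = true
          then ((false : Bool), ([] : List Char) ++ PySem.Chars.upper [c])
          else (((true : Bool), ([] : List Char)).1, ([] : List Char) ++ PySem.Chars.lower [c]))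
          = ((false : Bool), PySem.Chars.upper [c]) := by simp
      rw [hstep, set_message_loop_false]
      simp [PySem.Chars.upper, PySem.Chars.lower]
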